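-- pv_equiv track=rewrite | github.com/Kassey69/Python_seminars_old | Seminar4/Task36.py | second_in
-- ===== SOURCE A (Python) =====
-- def second_in(My_list, find): # создаем функцию по типу void, заполняем списком и искомым аргументом
--     count = 0   # включаем счетчик
--                                 # https://pythonchik.ru/osnovy/python-range
--     for i in range(len(My_list)): # перебирается цикл range  диапазон значений (len длины) списка, тут цикл идет по range
--         #i = str(i)  #индексы списка должны быть целыми числами или срезами, а не str -- ОШИБКА!!!!!!!!!!
--         if My_list[i] == find: # в цикле list ищем внутри каждого списка подсписок (индекс) list[i] = равный find
--             count += 1 #  каждый раз когда мы находим искомый аргумент счетчик сприбавляет +1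
--             # нам нужно найти второе вхождение аргумента, и тут же выйти записав на каком месте он находится в списке
--             if count == 2:
--                 return i # как только получаем второе вхождение отправляем обратно позицию второго вхождения строки в списке
--                 # i начинается с 0 а не с 1
--     if count < 2:
--         return -1
-- ===== SOURCE B (Python) =====
-- def second_in(My_list, find):
--     try:
--         first = My_list.index(find)
--         return first + 1 + My_list[first + 1:].index(find)
--     except ValueError:
--         return -1
-- ===== Notes on version B (the rewrite author's own statement) =====
-- stated objective: simpler
-- what changed: Replaces the counter-driven indexed loop with two sequential library scans: find the first occurrence with list.index, then search the tail past it for the next occurrence, returning -1 via ValueError if either scan fails.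
import Mathlib
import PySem

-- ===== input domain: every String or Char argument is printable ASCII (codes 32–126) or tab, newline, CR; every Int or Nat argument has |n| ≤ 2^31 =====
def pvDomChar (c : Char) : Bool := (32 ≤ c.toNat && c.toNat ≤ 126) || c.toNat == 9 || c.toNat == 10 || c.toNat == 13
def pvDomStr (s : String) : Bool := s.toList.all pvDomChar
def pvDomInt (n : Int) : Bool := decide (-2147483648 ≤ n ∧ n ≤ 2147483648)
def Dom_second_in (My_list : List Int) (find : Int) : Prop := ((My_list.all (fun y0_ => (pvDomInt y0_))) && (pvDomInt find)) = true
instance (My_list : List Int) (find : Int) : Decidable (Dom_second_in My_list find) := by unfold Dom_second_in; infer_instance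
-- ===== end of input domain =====

-- B replaces A's counter-driven indexed loop with two sequential scans: find the first
-- occurrence, then search the tail past it for the next one; -1 if either scan fails.


-- ===== PORT A =====
-- the 'for i in range(len(My_list))' loop with the running counter; at loop exit the
-- 'if count < 2' guard always holds (count == 2 returns inside the loop), so the exit value is -1
def secondInLoopA (My_list : List Int) (find : Int) (idxs : List Int) (count : Int) : Int :=
  match idxs with
  | [] => -1
  | i :: rest =>
    if PySem.List.pyGetD My_list i 0 == find then
      if count + 1 == 2 then i
      else secondInLoopA My_list find rest (count + 1)
    else secondInLoopA My_list find rest count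

def second_in (My_list : List Int) (find : Int) : Int :=
  secondInLoopA My_list find (PySem.List.pyRange 0 (PySem.List.len My_list) 1) 0

-- ===== PORT B =====
def second_in_alt (My_list : List Int) (find : Int) : Int :=
  match PySem.List.index? My_list find with
  | none => -1
  | some first =>
    match PySem.List.index? (PySem.List.slice My_list (some ((first : Int) + 1)) none) find with
    | none => -1
    | some j => (first : Int) + 1 + (j : Int)

-- ===== PRECONDITION & SPEC =====
def Spec_second_in (My_list : List Int) (find : Int) (out : Int) : Prop := out = second_in_alt My_list find
instance (My_list : List Int) (find : Int) (out : Int) : Decidable (Spec_second_in My_list find out) := by unfold Spec_second_in; infer_instance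

-- ===== CLAIM (what is proved, stated in full; the proofs are below) =====
def Claim_equal_second_in : Prop := ∀ (My_list : List Int) (find : Int), Dom_second_in My_list find → Spec_second_in My_list find (second_in My_list find)

-- ===== LEMMAS AND PROOFS =====

-- A's loop with count = 1 computes "index of next occurrence in the suffix, else -1"
lemma loopA_count_one (ys : List Int) : ∀ (My_list : List Int) (find : Int) (a : Nat),
    My_list.drop a = ys →
    secondInLoopA My_list find (PySem.List.pyRange a (My_list.length : Int) 1) 1 =
      (match PySem.List.index? ys find with
       | none => -1
       | some j => (a : Int) + (j : Int)) := by
  induction ys with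
  | nil =>
    intro xs find a hdrop
    have hlen : xs.length ≤ a := List.drop_eq_nil_iff.mp hdrop
    rw [PySem.List.pyRange_one_eq_nil (by exact_mod_cast hlen)]
    simp [secondInLoopA, PySem.List.index?]
  | cons y ys ih =>
    intro xs find a hdrop
    have ha : a < xs.length := by
      by_contra h
      rw [List.drop_eq_nil_iff.mpr (by omega)] at hdrop
      exact List.cons_ne_nil y ys hdrop.symm
    have hy : xs[a] = y := by
      have := congrArg (fun l => l[0]?) hdrop
      simpa [List.getElem?_drop, List.getElem?_eq_getElem ha] using this
    rw [PySem.List.pyRange_one_cons (by exact_mod_cast ha)]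
    have hget : PySem.List.pyGetD xs (a : Int) 0 = y := by
      rw [PySem.List.pyGetD_natCast]; simp [List.getD, List.getElem?_eq_getElem ha, hy]
    have hdrop' : xs.drop (a + 1) = ys := by
      have := congrArg (List.drop 1) hdrop
      simpa [List.drop_drop, Nat.add_comm] using this
    have hcast : ((a : Int) + 1) = ((a + 1 : Nat) : Int) := by push_cast; ring
    by_cases hfind : y = find
    · rw [hfind] at hget
      rw [hfind, PySem.List.index?_cons_self]
      simp [secondInLoopA, hget]
    · have hne : (y == find) = false := by simp [hfind]
      rw [PySem.List.index?_cons_of_ne ys hfind]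
      simp only [secondInLoopA, hget, hne, Bool.false_eq_true, if_false]
      rw [hcast, ih xs find (a + 1) hdrop']
      cases PySem.List.index? ys find with
      | none => rfl
      | some j => simp only [Option.map_some]; push_cast; ring

-- A's loop with count = 0 computes B's two-scan result on the suffix
lemma loopA_count_zero (ys : List Int) : ∀ (My_list : List Int) (find : Int) (a : Nat),
    My_list.drop a = ys →
    secondInLoopA My_list find (PySem.List.pyRange a (My_list.length : Int) 1) 0 =
      (match PySem.List.index? ys find with
       | none => -1
       | some f =>
         match PySem.List.index? (ys.drop (f + 1)) find with
         | none => -1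
         | some j => (a : Int) + (f : Int) + 1 + (j : Int)) := by
  induction ys with
  | nil =>
    intro xs find a hdrop
    have hlen : xs.length ≤ a := List.drop_eq_nil_iff.mp hdrop
    rw [PySem.List.pyRange_one_eq_nil (by exact_mod_cast hlen)]
    simp [secondInLoopA, PySem.List.index?]
  | cons y ys ih =>
    intro xs find a hdrop
    have ha : a < xs.length := by
      by_contra h
      rw [List.drop_eq_nil_iff.mpr (by omega)] at hdrop
      exact List.cons_ne_nil y ys hdrop.symm
    have hy : xs[a] = y := by
      have := congrArg (fun l => l[0]?) hdrop
      simpa [List.getElem?_drop, List.getElem?_eq_getElem ha] using this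
    rw [PySem.List.pyRange_one_cons (by exact_mod_cast ha)]
    have hget : PySem.List.pyGetD xs (a : Int) 0 = y := by
      rw [PySem.List.pyGetD_natCast]; simp [List.getD, List.getElem?_eq_getElem ha, hy]
    have hdrop' : xs.drop (a + 1) = ys := by
      have := congrArg (List.drop 1) hdrop
      simpa [List.drop_drop, Nat.add_comm] using this
    have hcast : ((a : Int) + 1) = ((a + 1 : Nat) : Int) := by push_cast; ring
    by_cases hfind : y = find
    · -- first occurrence at index a: the loop continues with count = 1
      rw [hfind] at hget
      rw [hfind, PySem.List.index?_cons_self]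
      have h1 := loopA_count_one ys xs find (a + 1) hdrop'
      simp only [secondInLoopA, hget, beq_self_eq_true, if_true]
      norm_num
      rw [hcast, h1]
      simp [PySem.List.index?_eq_idxOf?]
    · have hne : (y == find) = false := by simp [hfind]
      rw [PySem.List.index?_cons_of_ne ys hfind]
      simp only [secondInLoopA, hget, hne, Bool.false_eq_true, if_false]
      rw [hcast, ih xs find (a + 1) hdrop']
      cases PySem.List.index? ys find with
      | none => rfl
      | some f =>
        simp only [Option.map_some, List.drop_succ_cons]
        cases PySem.List.index? (ys.drop (f + 1)) find with
        | none => rfl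
        | some j => push_cast; ring

-- ===== VERDICT (by name: the statement is the Claim_ definition above) =====
theorem second_in_spec : Claim_equal_second_in := by
  intro xs find _
  show second_in xs find = second_in_alt xs find
  unfold second_in second_in_alt
  rw [PySem.List.len_eq]
  have h0 := loopA_count_zero xs xs find 0 (by simp)
  norm_num at h0 ⊢
  rw [h0]
  cases h : List.idxOf? find xs with
  | none => rfl
  | some f =>
    simp [PySem.List.slice_from xs (show (0:Int) ≤ (f : Int) + 1 by positivity),
      show ((f : Int) + 1).toNat = f + 1 by omega]
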